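-- pv_equiv track=rewrite | github.com/SD2E/experimental-intent-parser | intent_parser/table/table_utils.py | _is_valued_cells
-- ===== SOURCE A (Python) =====
-- def _get_token_type(token):
--     return token[0]
--
-- def _is_valued_cells(tokens):
--     if len(tokens) < 2:
--         return False
--     tokens = [token for token in tokens if _get_token_type(token) != 'SKIP']
--     next_token = 'NUMBER'
--     for token in tokens:
--         if next_token == 'NUMBER' and _get_token_type(token) != 'NUMBER':
--             return False
--         if next_token == 'SEPARATOR' and _get_token_type(token) != 'SEPARATOR':
--             return False
--         if next_token == 'EITHER'and _get_token_type(token) not in ['NUMBER', 'NAME', 'SEPARATOR']: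
--             return False
--
--         if _get_token_type(token) == 'NUMBER':
--             next_token = 'EITHER'
--         elif _get_token_type(token) == 'NAME':
--             next_token = 'SEPARATOR'
--         elif _get_token_type(token) == 'SEPARATOR':
--             next_token = 'NUMBER'
--         else:
--             return False
--
--     return True
-- ===== SOURCE B (Python) =====
-- _CODE = {'NUMBER': 'N', 'NAME': 'A', 'SEPARATOR': 'S'}
--
-- def _seg_ok(seg):
--     if seg and all(c == 'N' for c in seg):
--         return True
--     return len(seg) >= 2 and seg[-1] == 'A' and all(c == 'N' for c in seg[:-1])
--
-- def _is_valued_cells(tokens):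
--     if len(tokens) < 2:
--         return False
--     code = ''.join(_CODE.get(t[0], 'X') for t in tokens if t[0] != 'SKIP')
--     segments = code.split('S')
--     return all(_seg_ok(s) for s in segments[:-1]) and (segments[-1] == '' or _seg_ok(segments[-1]))
-- ===== Notes on version B (the rewrite author's own statement) =====
-- stated objective: alternative
-- what changed: Replaces the expected-next-token state machine with a split-and-shape check: surviving token types are mapped to one-char codes, the code string is split on SEPARATOR, and each segment must have the shape 'one or more NUMBERs optionally followed by one NAME', with only the trailing segment allowed to be empty.
import Mathlib
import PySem

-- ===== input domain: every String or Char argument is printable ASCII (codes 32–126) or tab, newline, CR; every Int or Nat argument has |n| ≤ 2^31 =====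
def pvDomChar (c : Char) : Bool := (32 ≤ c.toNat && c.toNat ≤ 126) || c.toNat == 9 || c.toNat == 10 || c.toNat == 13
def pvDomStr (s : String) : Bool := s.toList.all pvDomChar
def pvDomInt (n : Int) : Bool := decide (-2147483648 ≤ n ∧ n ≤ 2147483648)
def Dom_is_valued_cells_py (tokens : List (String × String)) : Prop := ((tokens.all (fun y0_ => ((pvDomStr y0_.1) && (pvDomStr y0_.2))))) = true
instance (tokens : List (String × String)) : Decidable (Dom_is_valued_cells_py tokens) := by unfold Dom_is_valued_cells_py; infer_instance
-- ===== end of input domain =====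

-- B replaces A's expected-next-token state machine by a split-on-SEPARATOR segment-shape check (alternative, same cost).

-- ===== PORT A =====
def pvGetTokenType (token : String × String) : String := token.1

-- the for-loop of A, carrying the `next_token` state; early `return False` = result false
def pvLoopA : String → List (String × String) → Bool
  | _, [] => true
  | next, t :: rest =>
    if next == "NUMBER" && pvGetTokenType t != "NUMBER" then false
    else if next == "SEPARATOR" && pvGetTokenType t != "SEPARATOR" then false
    else if next == "EITHER" && !(pvGetTokenType t == "NUMBER" || pvGetTokenType t == "NAME" || pvGetTokenType t == "SEPARATOR") then false
    else if pvGetTokenType t == "NUMBER" then pvLoopA "EITHER" rest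
    else if pvGetTokenType t == "NAME" then pvLoopA "SEPARATOR" rest
    else if pvGetTokenType t == "SEPARATOR" then pvLoopA "NUMBER" rest
    else false

def is_valued_cells_py (tokens : List (String × String)) : Bool :=
  if tokens.length < 2 then false
  else pvLoopA "NUMBER" (tokens.filter (fun t => pvGetTokenType t != "SKIP"))

-- ===== PORT B =====
-- _CODE.get(type, 'X'): the literal three-entry dict lookup with default
def pvCode (t : String) : Char :=
  if t == "NUMBER" then 'N' else if t == "NAME" then 'A'
  else if t == "SEPARATOR" then 'S' else 'X'

-- _seg_ok: nonempty all-'N', or length ≥ 2 ending in 'A' with all-'N' before it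
def pvSegOk (seg : List Char) : Bool :=
  if seg != [] && seg.all (fun c => c == 'N') then true
  else decide (2 ≤ seg.length) && seg.getLastD ' ' == 'A' && seg.dropLast.all (fun c => c == 'N')

-- code.split('S'): exact port of Python str.split with the one-char separator 'S'
def pvSplit : List Char → List (List Char)
  | [] => [[]]
  | c :: rest =>
    if c == 'S' then [] :: pvSplit rest
    else
      match pvSplit rest with
      | [] => [[c]]          -- unreachable: pvSplit never returns []
      | s :: ss => (c :: s) :: ss

def is_valued_cells_py_alt (tokens : List (String × String)) : Bool :=
  if tokens.length < 2 then false
  else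
    let segments := pvSplit ((tokens.filter (fun t => t.1 != "SKIP")).map (fun t => pvCode t.1))
    segments.dropLast.all pvSegOk &&
      (segments.getLastD [] == [] || pvSegOk (segments.getLastD []))

-- ===== PRECONDITION & SPEC =====
def Spec_is_valued_cells_py (tokens : List (String × String)) (out : Bool) : Prop := out = is_valued_cells_py_alt tokens
instance (tokens : List (String × String)) (out : Bool) : Decidable (Spec_is_valued_cells_py tokens out) := by unfold Spec_is_valued_cells_py; infer_instance

-- ===== CLAIM (what is proved, stated in full; the proofs are below) =====
def Claim_equal_is_valued_cells_py : Prop := ∀ (tokens : List (String × String)), Dom_is_valued_cells_py tokens → Spec_is_valued_cells_py tokens (is_valued_cells_py tokens)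

-- ===== LEMMAS AND PROOFS =====

-- A's state machine on the one-char codes ('n' = NUMBER expected, 's' = SEPARATOR expected, 'e' = EITHER)
def pvM (st : Char) : List Char → Bool
  | [] => true
  | c :: r =>
    if st == 'n' then (if c == 'N' then pvM 'e' r else false)
    else if st == 's' then (if c == 'S' then pvM 'n' r else false)
    else if c == 'N' then pvM 'e' r
    else if c == 'A' then pvM 's' r
    else if c == 'S' then pvM 'n' r
    else false

-- a segment matching N*A? (the relaxed, possibly-empty segment shape)
def pvSegE : List Char → Bool
  | [] => true
  | c :: r => if c == 'N' then pvSegE r else c == 'A' && r == []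

-- segment-list checks corresponding to the three machine states
def pvChkN : List (List Char) → Bool
  | [] => true
  | [s] => s == [] || pvSegOk s
  | s :: ss => pvSegOk s && pvChkN ss

def pvChkE : List (List Char) → Bool
  | [] => true
  | [s] => pvSegE s
  | s :: ss => pvSegE s && pvChkN ss

def pvChkS : List (List Char) → Bool
  | [] => true
  | [s] => s == []
  | s :: ss => (s == []) && pvChkN ss

theorem pvSplit_ne_nil : ∀ cs : List Char, pvSplit cs ≠ [] := by
  intro cs
  cases cs with
  | nil => simp [pvSplit]
  | cons c r =>
    simp only [pvSplit]
    split
    · simp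
    · cases h : pvSplit r <;> simp

theorem pvSegE_eq (s : List Char) :
    pvSegE s = (s.all (fun c => c == 'N') ||
      (s.getLastD ' ' == 'A' && s.dropLast.all (fun c => c == 'N'))) := by
  induction s with
  | nil => rfl
  | cons c r ih =>
    by_cases hc : c = 'N'
    · subst hc
      cases r with
      | nil => simp [pvSegE]
      | cons d t =>
        simp only [pvSegE, if_pos (by simp : (('N':Char) == 'N') = true)] at ih ⊢
        rw [ih]
        simp [List.dropLast_cons_of_ne_nil]
    · by_cases ha : c = 'A'
      · subst ha
        cases r with
        | nil => simp [pvSegE]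
        | cons d t =>
          simp [pvSegE, List.dropLast_cons_of_ne_nil]
      · cases r with
        | nil => simp [pvSegE, hc, ha]
        | cons d t => simp [pvSegE, hc, List.dropLast_cons_of_ne_nil]

theorem pvSegOk_cons (c : Char) (s : List Char) :
    pvSegOk (c :: s) = (c == 'N' && pvSegE s) := by
  rw [pvSegE_eq]
  cases s with
  | nil => by_cases hc : c = 'N' <;> simp [pvSegOk, hc]
  | cons d t =>
    have hbeq : ∀ e : Char, (c == e) = decide (c = e) := fun e => rfl
    by_cases hc : c = 'N' <;>
      simp [pvSegOk, hc, List.dropLast_cons_of_ne_nil, List.all_cons] <;>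
    cases hd : decide (d = 'N') <;> cases ht : decide (∀ x ∈ t, x = 'N') <;>
      simp_all [List.all_eq_true, beq_iff_eq] <;> try exact Or.inl ht

theorem pvSegOk_nil : pvSegOk [] = false := by decide

-- the bridge from B's dropLast/getLastD formulation to the recursive check
theorem pvChkN_bridge : ∀ (s : List Char) (ss : List (List Char)),
    ((s :: ss).dropLast.all pvSegOk &&
      ((s :: ss).getLastD [] == [] || pvSegOk ((s :: ss).getLastD [])))
    = pvChkN (s :: ss) := by
  intro s ss
  induction ss generalizing s with
  | nil => simp [pvChkN]
  | cons s2 r ih =>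
    have := ih s2
    simp only [List.dropLast_cons_of_ne_nil (l := s2 :: r) (by simp),
      List.all_cons, List.getLastD_cons] at this ⊢
    rw [Bool.and_assoc, this]
    cases r <;> simp [pvChkN]

-- the main characterisation: the machine equals the segment-shape check of the split
theorem pvM_split : ∀ cs : List Char,
    pvM 'n' cs = pvChkN (pvSplit cs) ∧
    pvM 's' cs = pvChkS (pvSplit cs) ∧
    pvM 'e' cs = pvChkE (pvSplit cs) := by
  intro cs
  induction cs with
  | nil => refine ⟨?_, ?_, ?_⟩ <;> decide
  | cons c r ih =>
    obtain ⟨ihN, ihS, ihE⟩ := ih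
    cases h : pvSplit r with
    | nil => exact absurd h (pvSplit_ne_nil r)
    | cons s ss =>
      rw [h] at ihN ihS ihE
      by_cases hN : c = 'N'
      · have hsp : pvSplit (c :: r) = (c :: s) :: ss := by simp [pvSplit, hN, h]
        refine ⟨?_, ?_, ?_⟩ <;>
          · rw [hsp]
            cases ss with
            | nil => simp [pvM, hN, pvChkN, pvChkS, pvChkE, pvSegOk_cons, pvSegE, ihE]
            | cons s2 r2 => simp [pvM, hN, pvChkN, pvChkS, pvChkE, pvSegOk_cons, pvSegE, ihE]
      · by_cases hA : c = 'A'
        · have hsp : pvSplit (c :: r) = (c :: s) :: ss := by simp [pvSplit, hA, h]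
          refine ⟨?_, ?_, ?_⟩ <;>
            · rw [hsp]
              cases ss with
              | nil => simp [pvM, hA, pvChkN, pvChkS, pvChkE, pvSegOk_cons, pvSegE, ihS]
              | cons s2 r2 => simp [pvM, hA, pvChkN, pvChkS, pvChkE, pvSegOk_cons, pvSegE, ihS]
        · by_cases hS : c = 'S'
          · subst hS
            have hsp : pvSplit ('S' :: r) = [] :: s :: ss := by simp [pvSplit, h]
            refine ⟨?_, ?_, ?_⟩ <;>
              · rw [hsp]
                simp [pvM, pvChkN, pvChkS, pvChkE, pvSegOk_nil, pvSegE, ihN]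
          · have hsp : pvSplit (c :: r) = (c :: s) :: ss := by simp [pvSplit, hS, h]
            refine ⟨?_, ?_, ?_⟩ <;>
              · rw [hsp]
                cases ss with
                | nil => simp [pvM, hN, hA, hS, pvChkN, pvChkS, pvChkE, pvSegOk_cons, pvSegE]
                | cons s2 r2 => simp [pvM, hN, hA, hS, pvChkN, pvChkS, pvChkE, pvSegOk_cons, pvSegE]

-- A's loop equals the char machine on the mapped codes
theorem pvLoopA_eq_pvM : ∀ l : List (String × String),
    pvLoopA "NUMBER" l = pvM 'n' (l.map (fun t => pvCode t.1)) ∧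
    pvLoopA "SEPARATOR" l = pvM 's' (l.map (fun t => pvCode t.1)) ∧
    pvLoopA "EITHER" l = pvM 'e' (l.map (fun t => pvCode t.1)) := by
  intro l
  induction l with
  | nil => refine ⟨rfl, rfl, rfl⟩
  | cons a rest ih =>
    obtain ⟨ihN, ihS, ihE⟩ := ih
    by_cases hN : a.1 = "NUMBER"
    · refine ⟨?_, ?_, ?_⟩ <;> simp [pvLoopA, pvGetTokenType, pvCode, pvM, hN, ihE]
    · by_cases hA : a.1 = "NAME"
      · refine ⟨?_, ?_, ?_⟩ <;> simp [pvLoopA, pvGetTokenType, pvCode, pvM, hA, ihS]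
      · by_cases hS : a.1 = "SEPARATOR"
        · refine ⟨?_, ?_, ?_⟩ <;> simp [pvLoopA, pvGetTokenType, pvCode, pvM, hS, ihN]
        · refine ⟨?_, ?_, ?_⟩ <;> simp [pvLoopA, pvGetTokenType, pvCode, pvM, hN, hA, hS]

-- ===== VERDICT (by name: the statement is the Claim_ definition above) =====
theorem is_valued_cells_py_spec : Claim_equal_is_valued_cells_py := by
  intro tokens _
  unfold Spec_is_valued_cells_py is_valued_cells_py is_valued_cells_py_alt
  by_cases hlen : tokens.length < 2
  · simp [hlen]
  · simp only [hlen, if_false, pvGetTokenType]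
    set l := tokens.filter (fun t => t.1 != "SKIP") with hl
    cases hsp : pvSplit (l.map (fun t => pvCode t.1)) with
    | nil => exact absurd hsp (pvSplit_ne_nil _)
    | cons s ss =>
      rw [(pvLoopA_eq_pvM l).1, (pvM_split (l.map (fun t => pvCode t.1))).1, hsp,
        pvChkN_bridge]
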